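-- pv_equiv track=rewrite | github.com/s-schneider/frospy | build/lib/frospy/util/data_request.py | _chunking_list
-- ===== SOURCE A (Python) =====
-- def _chunking_list(keyword, list):
--     """
--     taken from
--     http://stackoverflow.com/questions/19575702/pythonhow-to-split-
--     file-into-chunks-by-the-occurrence-of-the-header-word
--     """
--     chunks = []
--     current_chunk = []
--
--     for line in list:
--
--         if line.startswith(keyword) and current_chunk:
--             chunks.append(current_chunk[:])
--             current_chunk = []
--
--         current_chunk.append(line)
--     chunks.append(current_chunk)
--
--     return chunks
-- ===== SOURCE B (Python) =====
-- def _chunking_list(keyword, list):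
--     # Cut points: every position after the first whose line starts the keyword;
--     # the chunks are the slices between consecutive cut points.
--     bounds = [0] + [i for i, line in enumerate(list)
--                     if i > 0 and line.startswith(keyword)] + [len(list)]
--     return [list[a:b] for a, b in zip(bounds, bounds[1:])]
-- ===== Notes on version B (the rewrite author's own statement) =====
-- stated objective: alternative
-- what changed: Replaces A's single accumulate-and-flush pass (a current_chunk buffer flushed into chunks at each keyword line) with a two-pass decomposition: first collect the boundary indices where a chunk starts, then build the chunks by slicing between consecutive boundaries.
import Mathlib
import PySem

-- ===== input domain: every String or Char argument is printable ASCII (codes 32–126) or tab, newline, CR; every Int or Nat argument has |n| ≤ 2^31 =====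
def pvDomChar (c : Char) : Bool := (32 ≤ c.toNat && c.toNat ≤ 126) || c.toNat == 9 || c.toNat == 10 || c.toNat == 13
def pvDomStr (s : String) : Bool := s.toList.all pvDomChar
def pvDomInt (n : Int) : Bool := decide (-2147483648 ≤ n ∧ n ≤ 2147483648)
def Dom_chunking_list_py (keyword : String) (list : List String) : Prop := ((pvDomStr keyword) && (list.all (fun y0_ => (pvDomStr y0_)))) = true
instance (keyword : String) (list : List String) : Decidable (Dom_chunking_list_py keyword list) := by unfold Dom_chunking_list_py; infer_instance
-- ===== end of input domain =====

-- B replaces A's accumulate-and-flush pass by a two-pass decomposition: collect the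
-- boundary indices, then slice between consecutive boundaries (objective: alternative).

-- ===== PORT A =====
-- one loop step of A: flush current chunk on a keyword line (when nonempty), then append the line
def pvStepA (keyword : String) (st : List (List String) × List String) (line : String) :
    List (List String) × List String :=
  if PySem.Str.startswith line keyword && !st.2.isEmpty then (st.1 ++ [st.2], [line])
  else (st.1, st.2 ++ [line])

def chunking_list_py (keyword : String) (list : List String) : List (List String) :=
  let st := list.foldl (pvStepA keyword) (([] : List (List String)), ([] : List String))
  st.1 ++ [st.2]

-- ===== PORT B =====
def chunking_list_py_alt (keyword : String) (list : List String) : List (List String) :=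
  -- bounds = [0] + [i for i, line in enumerate(list) if i > 0 and line.startswith(keyword)] + [len(list)]
  let bounds : List Int :=
    [0] ++ ((PySem.List.enumerate list).filter
              (fun p => decide (0 < p.1) && PySem.Str.startswith p.2 keyword)).map (·.1)
        ++ [(list.length : Int)]
  -- [list[a:b] for a, b in zip(bounds, bounds[1:])]
  (bounds.zip bounds.tail).map (fun p => PySem.List.slice list (some p.1) (some p.2))

-- ===== PRECONDITION & SPEC =====
def Spec_chunking_list_py (keyword : String) (list : List String) (out : List (List String)) : Prop := out = chunking_list_py_alt keyword list
instance (keyword : String) (list : List String) (out : List (List String)) : Decidable (Spec_chunking_list_py keyword list out) := by unfold Spec_chunking_list_py; infer_instance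

-- ===== CLAIM (what is proved, stated in full; the proofs are below) =====
def Claim_equal_chunking_list_py : Prop := ∀ (keyword : String) (list : List String), Dom_chunking_list_py keyword list → Spec_chunking_list_py keyword list (chunking_list_py keyword list)

-- ===== LEMMAS AND PROOFS =====

-- the bounds list of B, named (chunking_list_py_alt is this let-expression, definitionally)
def pvBounds (keyword : String) (list : List String) : List Int :=
  [0] ++ ((PySem.List.enumerate list).filter
            (fun p => decide (0 < p.1) && PySem.Str.startswith p.2 keyword)).map (·.1)
      ++ [(list.length : Int)]

theorem alt_def (keyword : String) (list : List String) :
    chunking_list_py_alt keyword list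
      = ((pvBounds keyword list).zip (pvBounds keyword list).tail).map
          (fun p => PySem.List.slice list (some p.1) (some p.2)) := rfl

-- functional characterisation of A's loop: current chunk `cur`, remaining lines
def specChunks (keyword : String) (cur : List String) : List String → List (List String)
  | [] => [cur]
  | x :: xs =>
      if PySem.Str.startswith x keyword && !cur.isEmpty then cur :: specChunks keyword [x] xs
      else specChunks keyword (cur ++ [x]) xs

-- A's fold realises specChunks
theorem foldA_spec (keyword : String) (xs : List String) :
    ∀ (chunks : List (List String)) (cur : List String),
      (xs.foldl (pvStepA keyword) (chunks, cur)).1 ++ [(xs.foldl (pvStepA keyword) (chunks, cur)).2]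
        = chunks ++ specChunks keyword cur xs := by
  induction xs with
  | nil => intro chunks cur; simp [specChunks]
  | cons x xs ih =>
      intro chunks cur
      simp only [List.foldl_cons, pvStepA, specChunks]
      by_cases h : (PySem.Str.startswith x keyword && !cur.isEmpty) = true
      · rw [if_pos h, if_pos h]; simp [ih]
      · rw [if_neg h, if_neg h]; simp [ih]

-- the keyword positions inside the tail (0-based)
def idxK (keyword : String) : List String → List Nat
  | [] => []
  | x :: xs =>
      if PySem.Str.startswith x keyword then 0 :: (idxK keyword xs).map (· + 1)
      else (idxK keyword xs).map (· + 1)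

-- the full cut list for the tail: keyword positions plus the length
def bndsK (keyword : String) (xs : List String) : List Nat :=
  idxK keyword xs ++ [xs.length]

-- (extension of the current chunk, remaining chunks) contributed by the tail
def splitTail (keyword : String) : List String → List String × List (List String)
  | [] => ([], [])
  | x :: xs =>
      let p := splitTail keyword xs
      if PySem.Str.startswith x keyword then ([], (x :: p.1) :: p.2)
      else (x :: p.1, p.2)

theorem specChunks_splitTail (keyword : String) (xs : List String) :
    ∀ (cur : List String), cur ≠ [] →
      specChunks keyword cur xs
        = (cur ++ (splitTail keyword xs).1) :: (splitTail keyword xs).2 := by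
  induction xs with
  | nil => intro cur _; simp [specChunks, splitTail]
  | cons x xs ih =>
      intro cur hcur
      have hne : (!cur.isEmpty) = true := by
        cases cur with
        | nil => exact absurd rfl hcur
        | cons a as => rfl
      simp only [specChunks, splitTail, hne, Bool.and_true]
      by_cases h : PySem.Str.startswith x keyword = true
      · rw [if_pos h, if_pos h]
        rw [ih [x] (by simp)]
        simp
      · rw [if_neg h, if_neg h]
        rw [ih (cur ++ [x]) (by simp)]
        simp

-- slicing between shifted cut points of x :: xs = slicing between the cut points of xs
theorem shift_pairs (x : String) (xs : List String) (l : List Nat) :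
    (((l.map (· + 1)).zip ((l.map (· + 1)).tail)).map
        (fun p => ((x :: xs).drop p.1).take (p.2 - p.1)))
      = (l.zip l.tail).map (fun p => (xs.drop p.1).take (p.2 - p.1)) := by
  rw [← List.map_tail, List.zip_map, List.map_map]
  apply List.map_congr_left
  intro p _
  simp [Nat.add_sub_add_right]

-- bndsK is never empty
theorem bndsK_ne_nil (keyword : String) (xs : List String) : bndsK keyword xs ≠ [] := by
  unfold bndsK; simp

-- the tail's chunks are the slices between consecutive cut points of bndsK
theorem splitTail_slices (keyword : String) (xs : List String) :
    splitTail keyword xs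
      = (xs.take ((bndsK keyword xs).headD 0),
         ((bndsK keyword xs).zip (bndsK keyword xs).tail).map
           (fun p => (xs.drop p.1).take (p.2 - p.1))) := by
  induction xs with
  | nil => simp [splitTail, bndsK, idxK]
  | cons x xs ih =>
      by_cases h : PySem.Str.startswith x keyword = true
      · have hC : PySem.Chars.startswith x.toList keyword.toList = true := by
          simpa [PySem.Str.startswith] using h
        have hb : bndsK keyword (x :: xs) = 0 :: (bndsK keyword xs).map (· + 1) := by
          simp [bndsK, idxK, hC, List.map_append]
        have hnil : (bndsK keyword xs).map (· + 1) ≠ [] := by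
          simp [bndsK_ne_nil keyword xs]
        simp only [splitTail, h, if_pos, ih, hb]
        simp only [Prod.mk.injEq]
        refine ⟨by simp, ?_⟩
        obtain ⟨b, l, hl⟩ : ∃ b l, (bndsK keyword xs).map (· + 1) = b :: l := by
          cases hm : (bndsK keyword xs).map (· + 1) with
          | nil => exact absurd hm hnil
          | cons b l => exact ⟨b, l, rfl⟩
        have hlt : l = ((bndsK keyword xs).map (· + 1)).tail := by rw [hl]; rfl
        have hbb : b = (bndsK keyword xs).headD 0 + 1 := by
          cases hbk : bndsK keyword xs with
          | nil => exact absurd hbk (bndsK_ne_nil keyword xs)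
          | cons c m =>
              rw [hbk, List.map_cons] at hl
              simp only [List.cons.injEq] at hl
              simp [hl.1]
        rw [hl, List.tail_cons, List.zip_cons_cons, List.map_cons, ← hl, hlt, shift_pairs]
        simp [hbb]
      · have hC : PySem.Chars.startswith x.toList keyword.toList = false := by
          simpa [PySem.Str.startswith] using h
        have hb : bndsK keyword (x :: xs) = (bndsK keyword xs).map (· + 1) := by
          simp [bndsK, idxK, hC, List.map_append]
        simp only [splitTail, h, if_neg, ih, hb, Bool.false_eq_true, not_false_iff]
        simp only [Prod.mk.injEq]
        refine ⟨?_, by rw [shift_pairs]⟩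
        cases hbk : bndsK keyword xs with
        | nil => exact absurd hbk (bndsK_ne_nil keyword xs)
        | cons c m => simp
  
-- the filtered enumeration of the tail (start index s+1 > 0) is the shifted idxK, as Int casts
theorem enum_filter (keyword : String) (xs : List String) :
    ∀ s : Nat,
      ((PySem.List.enumerate xs ((s : Int) + 1)).filter
          (fun p => decide (0 < p.1) && PySem.Str.startswith p.2 keyword)).map (·.1)
        = (idxK keyword xs).map (fun j => ((j + s + 1 : Nat) : Int)) := by
  induction xs with
  | nil => intro s; simp [PySem.List.enumerate_nil, idxK]
  | cons x xs ih =>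
      intro s
      rw [PySem.List.enumerate_cons]
      have hpos : decide ((0 : Int) < (s : Int) + 1) = true := by
        simp only [decide_eq_true_eq]; omega
      have hstep : ((s : Int) + 1) + 1 = ((s + 1 : Nat) : Int) + 1 := by push_cast; ring
      by_cases h : PySem.Str.startswith x keyword = true
      · simp only [List.filter_cons, hpos, h, Bool.and_self, List.map_cons, idxK, if_pos]
        rw [hstep, ih (s + 1), List.map_map]
        congr 1
        · push_cast; ring
        · apply List.map_congr_left; intro j _; simp only [Function.comp]; push_cast; ring_nf
      · simp only [List.filter_cons, hpos, h, Bool.true_and, Bool.false_eq_true, if_neg,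
          not_false_iff, idxK]
        rw [hstep, ih (s + 1), List.map_map]
        apply List.map_congr_left; intro j _; simp only [Function.comp]; push_cast; ring_nf

-- slicing with Nat-cast bounds, mapped over a pair list
theorem zip_map_slice (list : List String) (l : List Nat) :
    ((l.map (fun n : Nat => (n : Int))).zip ((l.map (fun n : Nat => (n : Int))).tail)).map
        (fun p => PySem.List.slice list (some p.1) (some p.2))
      = (l.zip l.tail).map (fun p => (list.drop p.1).take (p.2 - p.1)) := by
  rw [← List.map_tail, List.zip_map, List.map_map]
  apply List.map_congr_left
  intro p _
  simp [PySem.List.slice_natCast]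

-- ===== VERDICT (by name: the statement is the Claim_ definition above) =====
theorem chunking_list_py_spec : Claim_equal_chunking_list_py := by
  intro keyword list _
  unfold Spec_chunking_list_py chunking_list_py
  rw [alt_def]
  have hA := foldA_spec keyword list ([] : List (List String)) ([] : List String)
  simp only [List.nil_append] at hA
  rw [hA]
  cases list with
  | nil =>
      simp [specChunks, pvBounds, PySem.List.enumerate_nil, PySem.List.slice]
  | cons x xs =>
      -- A's side
      have hAside : specChunks keyword ([] : List String) (x :: xs)
          = (x :: (splitTail keyword xs).1) :: (splitTail keyword xs).2 := by
        simp only [specChunks, List.isEmpty_nil, Bool.not_true, Bool.and_false,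
          Bool.false_eq_true, if_neg, not_false_iff, List.nil_append]
        exact specChunks_splitTail keyword xs [x] (by simp)
      -- B's side: the bounds are the Nat-cast of 0 :: (bndsK keyword xs).map (· + 1)
      have hbounds : pvBounds keyword (x :: xs)
          = (0 :: (bndsK keyword xs).map (· + 1)).map (fun n : Nat => (n : Int)) := by
        unfold pvBounds
        rw [PySem.List.enumerate_cons, List.filter_cons]
        have h0 : (decide ((0 : Int) < 0) && PySem.Str.startswith x keyword) = false := by simp
        rw [h0, if_neg (by simp)]
        have h01 : (0 : Int) + 1 = ((0 : Nat) : Int) + 1 := by norm_num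
        rw [h01, enum_filter keyword xs 0]
        simp [bndsK, List.map_append, List.map_map]
      rw [hbounds, zip_map_slice]
      -- evaluate the Nat-level slices via splitTail_slices
      have hS := splitTail_slices keyword xs
      obtain ⟨b, l, hl⟩ : ∃ b l, (bndsK keyword xs).map (· + 1) = b :: l := by
        cases hm : (bndsK keyword xs).map (· + 1) with
        | nil => simp [bndsK_ne_nil keyword xs] at hm
        | cons b l => exact ⟨b, l, rfl⟩
      have hlt : l = ((bndsK keyword xs).map (· + 1)).tail := by rw [hl]; rfl
      have hb : b = (bndsK keyword xs).headD 0 + 1 := by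
        cases hbk : bndsK keyword xs with
        | nil => exact absurd hbk (bndsK_ne_nil keyword xs)
        | cons c m =>
              rw [hbk, List.map_cons] at hl
              simp only [List.cons.injEq] at hl
              simp [hl.1]
      rw [hl, List.tail_cons, List.zip_cons_cons, List.map_cons, ← hl, hlt, shift_pairs x xs]
      rw [hAside, hS]
      simp [hb]
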